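-- pv_equiv track=rewrite | github.com/MuhammadjonQilichev-max/week6 | week6assignment.py | get_neighborhood_value_summary
-- ===== SOURCE A (Python) =====
-- def get_neighborhood_value_summary(listings):
--     totals = {}
--     for item in listings:
--          neighborhood = item[1]
--          price = item[2]
--          if neighborhood not in totals:
--               totals[neighborhood] = 0
--
--          totals[neighborhood] += price
--
--     summary = []
--     for name in sorted(totals):
--          summary.append((name, totals[name]))
--     return summary
-- ===== SOURCE B (Python) =====
-- def get_neighborhood_value_summary(listings):
--     names = sorted({item[1] for item in listings})
--     return [(name, sum(item[2] for item in listings if item[1] == name))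
--             for name in names]
-- ===== Notes on version B (the rewrite author's own statement) =====
-- stated objective: simpler
-- what changed: Replaces the dict-accumulation pass plus sorted-keys loop with a two-line comprehension: sort the distinct neighborhood names once, then compute each name's total with a direct filtered sum over the listings.
import Mathlib
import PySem

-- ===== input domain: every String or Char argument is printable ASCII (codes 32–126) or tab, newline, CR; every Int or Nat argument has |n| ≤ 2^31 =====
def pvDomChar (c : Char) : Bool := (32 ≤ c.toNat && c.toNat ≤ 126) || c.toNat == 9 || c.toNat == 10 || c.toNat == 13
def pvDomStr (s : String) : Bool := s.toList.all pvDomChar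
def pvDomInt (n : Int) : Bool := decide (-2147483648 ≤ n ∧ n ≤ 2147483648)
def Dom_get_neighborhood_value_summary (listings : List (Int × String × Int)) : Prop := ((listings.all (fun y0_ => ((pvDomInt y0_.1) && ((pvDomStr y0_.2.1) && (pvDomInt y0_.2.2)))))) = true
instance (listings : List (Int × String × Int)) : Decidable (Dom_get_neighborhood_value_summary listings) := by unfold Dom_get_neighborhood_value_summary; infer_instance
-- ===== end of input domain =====

-- B replaces A's dict-accumulation pass + sorted-keys loop with a sorted distinct-name list
-- and a direct filtered sum per name (objective: simpler; not faster).


-- ===== PORT A =====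
def get_neighborhood_value_summary (listings : List (Int × String × Int)) : List (String × Int) :=
  let totals : PySem.Dict String Int := listings.foldl
    (fun totals item =>
      let neighborhood := item.2.1
      let price := item.2.2
      let totals := if totals.contains neighborhood then totals
                    else totals.insert neighborhood 0
      totals.insert neighborhood (totals.getD neighborhood 0 + price))
    PySem.Dict.empty
  (PySem.List.sorted totals.keys (fun x => x) false).foldl
    (fun summary name => summary ++ [(name, totals.getD name 0)]) []

-- ===== PORT B =====
def get_neighborhood_value_summary_alt (listings : List (Int × String × Int)) : List (String × Int) :=
  let names := PySem.List.sorted (PySem.Set.ofList (listings.map (fun item => item.2.1))) (fun x => x) false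
  names.map (fun name =>
    (name, ((listings.filter (fun item => item.2.1 == name)).map (fun item => item.2.2)).sum))

-- ===== PRECONDITION & SPEC =====
def Spec_get_neighborhood_value_summary (listings : List (Int × String × Int)) (out : List (String × Int)) : Prop := out = get_neighborhood_value_summary_alt listings
instance (listings : List (Int × String × Int)) (out : List (String × Int)) : Decidable (Spec_get_neighborhood_value_summary listings out) := by unfold Spec_get_neighborhood_value_summary; infer_instance

-- ===== CLAIM (what is proved, stated in full; the proofs are below) =====
def Claim_equal_get_neighborhood_value_summary : Prop := ∀ (listings : List (Int × String × Int)), Dom_get_neighborhood_value_summary listings → Spec_get_neighborhood_value_summary listings (get_neighborhood_value_summary listings)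

-- ===== LEMMAS AND PROOFS =====

-- A's loop body ("if absent insert 0, then add price") is one overwrite-insert.
theorem pv_step_eq (totals : PySem.Dict String Int) (item : Int × String × Int) :
    ((if totals.contains item.2.1 then totals else totals.insert item.2.1 0).insert item.2.1
      ((if totals.contains item.2.1 then totals else totals.insert item.2.1 0).getD item.2.1 0 + item.2.2))
    = totals.insert item.2.1 (totals.getD item.2.1 0 + item.2.2) := by
  by_cases h : totals.contains item.2.1
  · simp [h]
  · simp only [Bool.not_eq_true] at h
    rw [PySem.Dict.getD_of_not_contains _ _ h]
    simp [h, PySem.Dict.insert_insert_self, PySem.Dict.getD_insert_self]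

-- Running value of the accumulation dict at any key.
theorem pv_getD_loop (l : List (Int × String × Int)) (d : PySem.Dict String Int) (n : String) :
    (l.foldl (fun d it => d.insert it.2.1 (d.getD it.2.1 0 + it.2.2)) d).getD n 0
    = d.getD n 0 + ((l.filter (fun it => it.2.1 == n)).map (fun it => it.2.2)).sum := by
  induction l generalizing d with
  | nil => simp
  | cons it t ih =>
    simp only [List.foldl_cons, ih, List.filter_cons]
    by_cases h : it.2.1 = n
    · simp [h, PySem.Dict.getD_insert_self]
      ring
    · rw [PySem.Dict.getD_insert_of_ne _ _ _ (fun e => h e.symm)]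
      simp [h]

theorem get_neighborhood_value_summary_eq (listings : List (Int × String × Int)) :
    get_neighborhood_value_summary listings = get_neighborhood_value_summary_alt listings := by
  unfold get_neighborhood_value_summary get_neighborhood_value_summary_alt
  dsimp only
  rw [PySem.List.foldl_congr_mem listings _
        (fun (d : PySem.Dict String Int) (it : Int × String × Int) =>
          d.insert it.2.1 (d.getD it.2.1 0 + it.2.2))
        PySem.Dict.empty (fun acc x _ => pv_step_eq acc x)]
  rw [PySem.List.foldl_append_singleton_eq_map]
  rw [PySem.Dict.keys_foldl_insert_key]
  simp only [PySem.Dict.keys_empty, List.nil_append]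
  have hk : PySem.Set.update ([] : List String) (listings.map (fun it => it.2.1))
      = PySem.Set.ofList (listings.map (fun item => item.2.1)) := rfl
  rw [hk]
  apply List.map_congr_left
  intro n _
  rw [pv_getD_loop]
  simp

-- ===== VERDICT (by name: the statement is the Claim_ definition above) =====
theorem get_neighborhood_value_summary_spec : Claim_equal_get_neighborhood_value_summary := by
  intro listings _
  unfold Spec_get_neighborhood_value_summary
  exact get_neighborhood_value_summary_eq listings
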